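-- pv_equiv track=rewrite | github.com/amanuelsen/Typing-test | function.py | fel_tecken
-- ===== SOURCE A (Python) =====
-- def fel_tecken(correct_text, user_text):
--     """
--     Identifiera och räkna felaktiga bokstäver i användarens inmatning jämfört med korrekt text (case-sensitive).
--     """
--     fel_letters = {}  # Initialize an empty dictionary to store incorrect characters and their counts.
--
--     correct_words = correct_text.split()
--     user_words = user_text.split()
--
--     for correct_word, user_word in zip(correct_words, user_words):
--         for correct_char, user_char in zip(correct_word, user_word):
--             if correct_char != user_char:
--                 if correct_char.isalpha():
--                     if correct_char not in fel_letters: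
--                         fel_letters[correct_char] = 1
--                     else:
--                         fel_letters[correct_char] += 1
--
--         # Handle missing characters in user_word
--         if len(user_word) < len(correct_word):
--             missing_chars = correct_word[len(user_word):]
--             for char in missing_chars:
--                 if char.isalpha():
--                     if char not in fel_letters:
--                         fel_letters[char] = 1
--                     else:
--                         fel_letters[char] += 1
--
--     # Handle missing words in user_text
--     if len(user_words) < len(correct_words):
--         missing_words = correct_words[len(user_words):]
--         for word in missing_words:
--             for char in word:
--                 if char.isalpha():
--                     if char not in fel_letters:
--                         fel_letters[char] = 1
--                     else:
--                         fel_letters[char] += 1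
--
--     result = tuple((char, count)
--                    for char, count in fel_letters.items())
--
--     return result
-- ===== SOURCE B (Python) =====
-- def fel_tecken(correct_text, user_text):
--     """Single padded pass: walk correct words with an index, pad missing user
--     words/chars, and count every wrong-or-missing alphabetic correct char."""
--     counts = {}
--     correct_words = correct_text.split()
--     user_words = user_text.split()
--     for i, cw in enumerate(correct_words):
--         uw = user_words[i] if i < len(user_words) else ""
--         for j, c in enumerate(cw):
--             u = uw[j] if j < len(uw) else None
--             if u != c and c.isalpha():
--                 counts[c] = counts.get(c, 0) + 1
--     return tuple(counts.items())
-- ===== Notes on version B (the rewrite author's own statement) =====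
-- stated objective: simpler
-- what changed: A's three counting blocks (zip mismatches, missing-char tail per word, missing-word tail) are merged into one index-driven padded pass: each correct word is paired with the user word at the same index (or "") and each correct char with the user char at the same position (or None), with a single count condition.
import Mathlib
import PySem

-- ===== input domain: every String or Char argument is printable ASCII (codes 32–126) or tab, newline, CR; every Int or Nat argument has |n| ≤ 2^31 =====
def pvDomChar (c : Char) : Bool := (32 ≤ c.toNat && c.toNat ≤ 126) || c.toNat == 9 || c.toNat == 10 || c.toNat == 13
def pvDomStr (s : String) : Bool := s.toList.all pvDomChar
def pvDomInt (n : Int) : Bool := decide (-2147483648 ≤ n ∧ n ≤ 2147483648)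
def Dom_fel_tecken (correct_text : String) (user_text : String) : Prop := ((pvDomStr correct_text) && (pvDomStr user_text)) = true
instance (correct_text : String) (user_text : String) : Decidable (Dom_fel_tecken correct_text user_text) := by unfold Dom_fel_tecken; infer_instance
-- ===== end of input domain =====

-- B merges A's three counting blocks into one index-driven padded pass; same return value, no speed claim.

-- ===== PORT A =====
-- the two branches of A's 'if c not in fel_letters: fel_letters[c] = 1 else: fel_letters[c] += 1'
def pvA_count (d : PySem.Dict Char Int) (c : Char) : PySem.Dict Char Int :=
  if d.contains c = false then d.insert c 1 else d.insert c (d.getD c 0 + 1)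

-- body of A's inner zip loop
def pvA_zipStep (d : PySem.Dict Char Int) (q : Char × Char) : PySem.Dict Char Int :=
  if q.1 ≠ q.2 then (if PySem.Chars.isalpha q.1 = true then pvA_count d q.1 else d) else d

-- body of A's missing-chars / missing-words char loops
def pvA_alphaStep (d : PySem.Dict Char Int) (c : Char) : PySem.Dict Char Int :=
  if PySem.Chars.isalpha c = true then pvA_count d c else d

-- body of A's outer 'for correct_word, user_word in zip(...)' loop
-- (correct_word[len(user_word):] with a nonnegative bound is List.drop)
def pvA_wordStep (d : PySem.Dict Char Int) (p : String × String) : PySem.Dict Char Int :=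
  let d := (p.1.toList.zip p.2.toList).foldl pvA_zipStep d
  if p.2.toList.length < p.1.toList.length then
    (p.1.toList.drop p.2.toList.length).foldl pvA_alphaStep d
  else d

def fel_tecken (correct_text : String) (user_text : String) : List (String × Int) :=
  let correct_words := PySem.Str.split₀ correct_text
  let user_words := PySem.Str.split₀ user_text
  let fel := (correct_words.zip user_words).foldl pvA_wordStep PySem.Dict.empty
  let fel := if user_words.length < correct_words.length then
      (correct_words.drop user_words.length).foldl
        (fun d w => w.toList.foldl pvA_alphaStep d) fel
    else fel
  fel.items.map (fun p => (String.ofList [p.1], p.2))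

-- ===== PORT B =====
-- body of B's inner 'for j, c in enumerate(cw)' loop ('u = uw[j] if j < len(uw) else None')
def pvB_charStep (uw : String) (d : PySem.Dict Char Int) (r : Int × Char) : PySem.Dict Char Int :=
  let u : Option Char := if r.1 < (uw.toList.length : Int) then PySem.List.pyGet? uw.toList r.1 else none
  if u ≠ some r.2 ∧ PySem.Chars.isalpha r.2 = true then d.insert r.2 (d.getD r.2 0 + 1) else d

-- body of B's outer 'for i, cw in enumerate(correct_words)' loop
def pvB_wordStep (user_words : List String) (d : PySem.Dict Char Int) (q : Int × String) :
    PySem.Dict Char Int :=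
  let uw := if q.1 < (user_words.length : Int) then PySem.List.pyGetD user_words q.1 "" else ""
  (PySem.List.enumerate q.2.toList 0).foldl (pvB_charStep uw) d

def fel_tecken_alt (correct_text : String) (user_text : String) : List (String × Int) :=
  let correct_words := PySem.Str.split₀ correct_text
  let user_words := PySem.Str.split₀ user_text
  let counts := (PySem.List.enumerate correct_words 0).foldl (pvB_wordStep user_words) PySem.Dict.empty
  counts.items.map (fun p => (String.ofList [p.1], p.2))

-- ===== PRECONDITION & SPEC =====
def Spec_fel_tecken (correct_text : String) (user_text : String) (out : List (String × Int)) : Prop := out = fel_tecken_alt correct_text user_text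
instance (correct_text : String) (user_text : String) (out : List (String × Int)) : Decidable (Spec_fel_tecken correct_text user_text out) := by unfold Spec_fel_tecken; infer_instance

-- ===== CLAIM (what is proved, stated in full; the proofs are below) =====
def Claim_equal_fel_tecken : Prop := ∀ (correct_text : String) (user_text : String), Dom_fel_tecken correct_text user_text → Spec_fel_tecken correct_text user_text (fel_tecken correct_text user_text)

-- ===== LEMMAS AND PROOFS =====

-- zip of the two lists padded on the right with a default
def padZip {α β : Type} (dflt : β) : List α → List β → List (α × β)
  | [], _ => []
  | a :: as, [] => (a, dflt) :: padZip dflt as []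
  | a :: as, b :: bs => (a, b) :: padZip dflt as bs

theorem padZip_nil_right {α β : Type} (dflt : β) (as : List α) :
    padZip dflt as [] = as.map (fun a => (a, dflt)) := by
  induction as with
  | nil => rfl
  | cons a as ih => simp [padZip, ih]

-- A's shape: fold over the zip, then a fold over the dropped tail, is a fold over the padded zip
theorem foldl_zip_drop_eq_padZip {α β σ : Type} (g : σ → α × β → σ) (dflt : β) :
    ∀ (as : List α) (bs : List β) (d : σ),
      (if bs.length < as.length then
          (as.drop bs.length).foldl (fun d a => g d (a, dflt)) ((as.zip bs).foldl g d)
        else (as.zip bs).foldl g d)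
      = (padZip dflt as bs).foldl g d := by
  intro as
  induction as with
  | nil => intro bs d; simp [padZip]
  | cons a as ih =>
    intro bs d
    cases bs with
    | nil => simp [padZip, padZip_nil_right, List.foldl_map]
    | cons b bs => simpa [padZip, Nat.succ_lt_succ_iff] using ih bs (g d (a, b))

-- B's shape: fold over 'enumerate' with a guarded positional lookup is a fold over the padded zip
theorem foldl_enumerate_fetch_eq_padZip {α β σ : Type} (g : σ → α × β → σ) (dflt : β)
    (bs : List β) (fetch : Int → β) (hf : ∀ j : Nat, fetch (j : Int) = (bs[j]?).getD dflt) :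
    ∀ (as : List α) (s : Nat) (d : σ),
      (PySem.List.enumerate as (s : Int)).foldl (fun d q => g d (q.2, fetch q.1)) d
      = (padZip dflt as (bs.drop s)).foldl g d := by
  intro as
  induction as with
  | nil => intro s d; simp [PySem.List.enumerate_nil, padZip]
  | cons a as ih =>
    intro s d
    rw [PySem.List.enumerate_cons]
    simp only [List.foldl_cons]
    have hcast : ((s : Int) + 1) = ((s + 1 : Nat) : Int) := by push_cast; ring
    rw [hcast, ih (s + 1) (g d (a, fetch (s : Int)))]
    by_cases hs : s < bs.length
    · have hd : bs.drop s = bs[s] :: bs.drop (s + 1) := List.drop_eq_getElem_cons hs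
      rw [hd]
      simp [padZip, hf s, List.getElem?_eq_getElem hs]
    · have h1 : bs.drop s = [] := List.drop_eq_nil_of_le (Nat.le_of_not_lt hs)
      have h2 : bs.drop (s + 1) = [] := List.drop_eq_nil_of_le (by omega)
      rw [h1, h2]
      simp [padZip, hf s, List.getElem?_eq_none_iff.mpr (Nat.le_of_not_lt hs)]

-- the common per-(correct char, padded user char) step both programs reduce to
def pvStep (d : PySem.Dict Char Int) (p : Char × Option Char) : PySem.Dict Char Int :=
  if p.2 ≠ some p.1 ∧ PySem.Chars.isalpha p.1 = true then d.insert p.1 (d.getD p.1 0 + 1) else d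

theorem pvA_count_eq (d : PySem.Dict Char Int) (c : Char) :
    pvA_count d c = d.insert c (d.getD c 0 + 1) := by
  unfold pvA_count
  by_cases h : d.contains c = false
  · have hn : d.get? c = none := (PySem.Dict.get?_eq_none_iff_contains d c).mpr h
    have hg : d.getD c 0 = 0 := by rw [PySem.Dict.getD, hn]; rfl
    rw [if_pos h, hg]
    norm_num
  · rw [if_neg h]

theorem pvA_zipStep_eq (d : PySem.Dict Char Int) (q : Char × Char) :
    pvA_zipStep d q = pvStep d (q.1, some q.2) := by
  rcases q with ⟨c, u⟩
  unfold pvA_zipStep pvStep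
  by_cases h1 : c = u
  · simp [h1]
  · have h1' : ¬ (some u = some c) := by simpa [eq_comm] using h1
    by_cases h2 : PySem.Chars.isalpha c = true
    · simp [h1, h1', h2, pvA_count_eq]
    · simp [h1, h1', h2]

theorem pvA_alphaStep_eq (d : PySem.Dict Char Int) (c : Char) :
    pvA_alphaStep d c = pvStep d (c, none) := by
  unfold pvA_alphaStep pvStep
  by_cases h : PySem.Chars.isalpha c = true <;> simp [h, pvA_count_eq]

-- per-word: A's zip loop + missing-chars block equals a fold of pvStep over the char-level padded zip
theorem pvA_word_eq (w u : String) (d : PySem.Dict Char Int) :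
    pvA_wordStep d (w, u)
      = (padZip (none : Option Char) w.toList (u.toList.map some)).foldl pvStep d := by
  unfold pvA_wordStep
  have h := foldl_zip_drop_eq_padZip pvStep (none : Option Char) w.toList (u.toList.map some) d
  simp only [List.length_map] at h
  rw [← h]
  have hz : w.toList.zip (u.toList.map some) = (w.toList.zip u.toList).map (fun p => (p.1, some p.2)) := by
    rw [List.zip_map_right]
    exact List.map_congr_left (fun p _ => by rcases p with ⟨x, y⟩; rfl)
  rw [hz, List.foldl_map]
  simp only [funext (fun d => funext (pvA_zipStep_eq d)), funext (fun d => funext (pvA_alphaStep_eq d))]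

-- A's missing-word block on one word equals the same fold against an empty user word
theorem pvA_missingWord_eq (w : String) (d : PySem.Dict Char Int) :
    w.toList.foldl pvA_alphaStep d
      = (padZip (none : Option Char) w.toList ((""
          : String).toList.map some)).foldl pvStep d := by
  have : (("" : String).toList.map some) = ([] : List (Option Char)) := rfl
  rw [this, padZip_nil_right, List.foldl_map]
  simp only [funext (fun d => funext (pvA_alphaStep_eq d))]

-- B's inner loop equals the same fold of pvStep over the char-level padded zip
theorem pvB_inner_eq (w u : String) (d : PySem.Dict Char Int) :
    (PySem.List.enumerate w.toList 0).foldl (pvB_charStep u) d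
      = (padZip (none : Option Char) w.toList (u.toList.map some)).foldl pvStep d := by
  have hf : ∀ j : Nat,
      (if (j : Int) < (u.toList.length : Int) then PySem.List.pyGet? u.toList (j : Int) else none)
        = ((u.toList.map some)[j]?).getD none := by
    intro j
    by_cases hj : j < u.toList.length
    · rw [if_pos (by exact_mod_cast hj), PySem.List.pyGet?_natCast, List.getElem?_map,
        List.getElem?_eq_getElem hj]
      rfl
    · rw [if_neg (by omega), List.getElem?_eq_none_iff.mpr (by simpa using Nat.le_of_not_lt hj)]
      rfl
  have h := foldl_enumerate_fetch_eq_padZip pvStep (none : Option Char) (u.toList.map some)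
      (fun i => if i < (u.toList.length : Int) then PySem.List.pyGet? u.toList i else none) hf
      w.toList 0 d
  simp only [List.drop_zero, Int.natCast_zero] at h
  rw [← h]
  rfl

-- the common per-(correct word, padded user word) step
def pvWStep (d : PySem.Dict Char Int) (p : String × String) : PySem.Dict Char Int :=
  (padZip (none : Option Char) p.1.toList (p.2.toList.map some)).foldl pvStep d

theorem dict_eq (cws uws : List String) :
    (if uws.length < cws.length then
        (cws.drop uws.length).foldl (fun d w => w.toList.foldl pvA_alphaStep d)
          ((cws.zip uws).foldl pvA_wordStep PySem.Dict.empty)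
      else (cws.zip uws).foldl pvA_wordStep PySem.Dict.empty)
    = (PySem.List.enumerate cws 0).foldl (pvB_wordStep uws) PySem.Dict.empty := by
  have hA : ∀ d : PySem.Dict Char Int,
      (if uws.length < cws.length then
        (cws.drop uws.length).foldl (fun d w => w.toList.foldl pvA_alphaStep d)
          ((cws.zip uws).foldl pvA_wordStep d)
      else (cws.zip uws).foldl pvA_wordStep d)
      = (padZip "" cws uws).foldl pvWStep d := by
    intro d
    rw [← foldl_zip_drop_eq_padZip pvWStep ("" : String) cws uws d]
    have e1 : pvA_wordStep = pvWStep := by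
      funext d p; rcases p with ⟨w, u⟩; exact pvA_word_eq w u d
    have e2 : (fun (d : PySem.Dict Char Int) (w : String) => w.toList.foldl pvA_alphaStep d)
        = (fun d w => pvWStep d (w, "")) := by
      funext d w; exact pvA_missingWord_eq w d
    rw [e1, e2]
  have hf : ∀ j : Nat,
      (if (j : Int) < (uws.length : Int) then PySem.List.pyGetD uws (j : Int) "" else "")
        = (uws[j]?).getD "" := by
    intro j
    by_cases hj : j < uws.length
    · rw [if_pos (by exact_mod_cast hj)]
      simp [PySem.List.pyGetD_natCast, hj]
    · rw [if_neg (by omega), List.getElem?_eq_none_iff.mpr (Nat.le_of_not_lt hj)]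
      rfl
  have hB := foldl_enumerate_fetch_eq_padZip pvWStep ("" : String) uws
      (fun i => if i < (uws.length : Int) then PySem.List.pyGetD uws i "" else "") hf
      cws 0 PySem.Dict.empty
  simp only [List.drop_zero, Int.natCast_zero] at hB
  have hBody : (fun (d : PySem.Dict Char Int) (q : Int × String) =>
        pvWStep d (q.2, if q.1 < (uws.length : Int) then PySem.List.pyGetD uws q.1 "" else ""))
      = pvB_wordStep uws := by
    funext d q
    unfold pvB_wordStep
    exact (pvB_inner_eq q.2 _ d).symm
  rw [hA PySem.Dict.empty, ← hB, hBody]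

-- ===== VERDICT (by name: the statement is the Claim_ definition above) =====
theorem fel_tecken_spec : Claim_equal_fel_tecken := by
  intro correct_text user_text _
  unfold Spec_fel_tecken fel_tecken fel_tecken_alt
  simp only
  rw [dict_eq (PySem.Str.split₀ correct_text) (PySem.Str.split₀ user_text)]
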